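-- pv_equiv track=rewrite | github.com/NelsonGuiamba/Checkers-minmax | minmax.py | _maxCapture
-- ===== SOURCE A (Python) =====
-- def _maxCapture(array):
--     maxPosition, maxLen = 0, len(array[0])
--     maxPositions = [array[0]]
--     for p in range(1, len(array)):
--         if len(array[p]) == maxLen:
--             maxPositions.append(array[p])
--
--         if len(array[p]) > maxLen:
--             maxLen = len(array[p])
--             maxPosition = p
--             maxPositions = [array[p]]
--     return maxPositions
-- ===== SOURCE B (Python) =====
-- def _maxCapture(array):
--     maxLen = max(map(len, array))
--     return [a for a in array if len(a) == maxLen]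
-- ===== Notes on version B (the rewrite author's own statement) =====
-- stated objective: simpler
-- what changed: Replaces the single accumulate-and-reset pass (tracking running max with conditional appends and resets) by a two-pass max-then-filter: compute the maximum length with max(), then keep the subarrays of that length.
import Mathlib
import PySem

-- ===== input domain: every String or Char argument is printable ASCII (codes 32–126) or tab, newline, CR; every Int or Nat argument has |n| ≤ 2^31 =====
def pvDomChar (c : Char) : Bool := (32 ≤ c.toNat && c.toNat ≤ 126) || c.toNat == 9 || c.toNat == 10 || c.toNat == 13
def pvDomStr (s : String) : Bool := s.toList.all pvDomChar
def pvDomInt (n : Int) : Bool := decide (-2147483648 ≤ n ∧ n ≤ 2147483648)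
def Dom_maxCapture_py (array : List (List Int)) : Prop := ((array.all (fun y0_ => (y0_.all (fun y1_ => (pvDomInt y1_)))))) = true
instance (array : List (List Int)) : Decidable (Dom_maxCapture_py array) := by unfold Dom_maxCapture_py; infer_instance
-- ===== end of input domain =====

-- B replaces A's single accumulate-and-reset pass by a max-then-filter decomposition (objective: simpler).
-- Both A and B raise on the empty list (IndexError resp. ValueError), so Pre_ excludes it.

-- ===== PORT A =====
-- A's loop state: (maxLen, maxPositions). A also tracks maxPosition, which is never
-- read after being written and does not affect the return value; it is omitted.
def maxCaptureStepA (st : Int × List (List Int)) (ap : List Int) : Int × List (List Int) :=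
  let st1 := if (ap.length : Int) = st.1 then (st.1, st.2 ++ [ap]) else st
  if (ap.length : Int) > st1.1 then ((ap.length : Int), [ap]) else st1

def maxCapture_py (array : List (List Int)) : List (List Int) :=
  match array with
  | [] => []   -- unreachable under Pre_: Python raises IndexError on array[0]
  | a0 :: _ =>
    ((PySem.List.pyRange 1 (array.length : Int) 1).foldl
      (fun st p => maxCaptureStepA st (PySem.List.pyGetD array p []))
      ((a0.length : Int), [a0])).2

-- ===== PORT B =====
def maxCapture_py_alt (array : List (List Int)) : List (List Int) :=
  match PySem.List.max? (array.map (fun a => (a.length : Int))) (fun x => x) with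
  | none => []   -- unreachable under Pre_: Python's max raises ValueError on the empty list
  | some maxLen => array.filter (fun a => (a.length : Int) == maxLen)

-- ===== PRECONDITION & SPEC =====
-- Pre_ excludes only the empty list, on which the Python A raises IndexError.
def Pre_maxCapture_py (array : List (List Int)) : Prop := array ≠ []
instance (array : List (List Int)) : Decidable (Pre_maxCapture_py array) := by unfold Pre_maxCapture_py; infer_instance
def pvWitness_maxCapture_py : List (List Int) := [[1, 2], [3], [4, 5]]

def Spec_maxCapture_py (array : List (List Int)) (out : List (List Int)) : Prop := out = maxCapture_py_alt array
instance (array : List (List Int)) (out : List (List Int)) : Decidable (Spec_maxCapture_py array out) := by unfold Spec_maxCapture_py; infer_instance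

-- ===== CLAIM (what is proved, stated in full; the proofs are below) =====
def Claim_equal_maxCapture_py : Prop := ∀ (array : List (List Int)), Dom_maxCapture_py array → Pre_maxCapture_py array → Spec_maxCapture_py array (maxCapture_py array)

-- ===== LEMMAS AND PROOFS =====

-- running maximum of lengths, seeded with m
def fmaxLen (l : List (List Int)) (m : Int) : Int :=
  l.foldl (fun x a => max x (a.length : Int)) m

theorem le_fmaxLen (l : List (List Int)) (m : Int) : m ≤ fmaxLen l m := by
  induction l generalizing m with
  | nil => simp [fmaxLen]
  | cons a t ih =>
    have := ih (max m (a.length : Int))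
    simp only [fmaxLen, List.foldl_cons] at *
    omega

-- characterisation of A's fold: final maxLen is the running max, and maxPositions is
-- acc ++ the equal-length elements if no new max appeared, else the filter at the new max.
theorem foldA_char (l : List (List Int)) (m : Int) (acc : List (List Int)) :
    l.foldl maxCaptureStepA (m, acc) =
      (fmaxLen l m,
        if fmaxLen l m = m then acc ++ l.filter (fun a => (a.length : Int) == m)
        else l.filter (fun a => (a.length : Int) == fmaxLen l m)) := by
  induction l generalizing m acc with
  | nil => simp [fmaxLen]
  | cons a t ih =>
    have hfm : fmaxLen (a :: t) m = fmaxLen t (max m (a.length : Int)) := by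
      simp [fmaxLen]
    have hle := le_fmaxLen t (max m (a.length : Int))
    by_cases heq : (a.length : Int) = m
    · -- equal: append a, maxLen unchanged
      have hstep : maxCaptureStepA (m, acc) a = (m, acc ++ [a]) := by
        simp [maxCaptureStepA, heq]
      have hmax : max m (a.length : Int) = m := by omega
      rw [List.foldl_cons, hstep, ih, hfm, hmax]
      by_cases hf : fmaxLen t m = m
      · simp [hf, heq]
      · have h2 : ¬ m = fmaxLen t m := fun h => hf h.symm
        simp [hf, h2, heq]
    · by_cases hgt : (a.length : Int) > m
      · -- new max: reset
        have hstep : maxCaptureStepA (m, acc) a = ((a.length : Int), [a]) := by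
          simp [maxCaptureStepA, heq, hgt]
        have hmax : max m (a.length : Int) = (a.length : Int) := by omega
        rw [List.foldl_cons, hstep, ih, hfm, hmax]
        rw [hmax] at hle
        by_cases hf : fmaxLen t (a.length : Int) = (a.length : Int)
        · have hne : fmaxLen t (a.length : Int) ≠ m := by omega
          simp [hf]
          exact fun h => absurd h heq
        · have hne : fmaxLen t (a.length : Int) ≠ m := by omega
          have : fmaxLen t (a.length : Int) ≠ (a.length : Int) := hf
          simp [hf, hne, Ne.symm this]
      · -- smaller: skip
        have hlt : (a.length : Int) < m := by omega
        have hstep : maxCaptureStepA (m, acc) a = (m, acc) := by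
          simp [maxCaptureStepA, heq]
          omega
        have hmax : max m (a.length : Int) = m := by omega
        rw [List.foldl_cons, hstep, ih, hfm, hmax]
        rw [hmax] at hle
        by_cases hf : fmaxLen t m = m
        · simp [hf, heq]
        · have : fmaxLen t m ≠ (a.length : Int) := by omega
          simp [hf, Ne.symm this]

-- ===== VERDICT (by name: the statement is the Claim_ definition above) =====
theorem maxCapture_py_spec : Claim_equal_maxCapture_py := by
  intro array _ hpre
  unfold Spec_maxCapture_py
  match array, hpre with
  | a0 :: tl, _ =>
    unfold maxCapture_py maxCapture_py_alt
    -- B's max over the nonempty mapped list is the running max seeded at a0.length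
    rw [List.map_cons, PySem.List.max?_id_cons]
    -- A's index loop over range(1, len) is a fold over the tail
    dsimp only
    rw [show (PySem.List.pyRange 1 ((a0 :: tl).length : Int) 1).foldl
          (fun st p => maxCaptureStepA st (PySem.List.pyGetD (a0 :: tl) p []))
          ((a0.length : Int), [a0])
        = ((a0 :: tl).drop (1 : Int).toNat).foldl maxCaptureStepA ((a0.length : Int), [a0])
      from PySem.List.foldl_pyRange_pyGetD' (a0 :: tl) [] maxCaptureStepA _ (a := 1) (by norm_num)]
    simp only [Int.toNat_one, List.drop_one, List.tail_cons]
    rw [foldA_char]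
    have hfold : (tl.map (fun a => (a.length : Int))).foldl max (a0.length : Int)
        = fmaxLen tl (a0.length : Int) := by
      simp [fmaxLen, List.foldl_map]
    rw [hfold]
    by_cases hf : fmaxLen tl (a0.length : Int) = (a0.length : Int)
    · simp [hf]
    · have := le_fmaxLen tl (a0.length : Int)
      have : ((a0.length : Int) == fmaxLen tl (a0.length : Int)) = false := by
        simp; omega
      simp [hf, this]
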